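-- pv_equiv track=rewrite | github.com/Tbeck202/PythonCourse | regex.py | song_decoder
-- ===== SOURCE A (Python) =====
-- def song_decoder(target):
--     decoded = ''
--     recoded = ''
--     no_wubs = target.replace('WUB', ' ')
--
--     for index, item in enumerate(no_wubs):
--         if item != ' ':
--             decoded += f"{item}"
--         elif index > 0 and item == ' ':
--             check_space = str(no_wubs[index - 1])
--             if check_space != ' ':
--                 decoded += item
--     for idx, item in enumerate(decoded):
--         if idx == len(decoded) - 1 and item == ' ':
--             continue
--         else:
--             recoded += f"{item}"
--     return recoded
-- ===== SOURCE B (Python) =====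
-- def song_decoder(target):
--     no_wubs = target.replace('WUB', ' ')
--     return ' '.join(w for w in no_wubs.split(' ') if w)
-- ===== Notes on version B (the rewrite author's own statement) =====
-- stated objective: simpler
-- what changed: A's two stateful character-by-character passes (space-collapsing with a previous-character index lookup, then a trailing-space trim pass) are replaced by a single tokenize-then-join decomposition: split on the space separator, drop empty tokens, rejoin; join also avoids A's repeated string concatenation.
import Mathlib
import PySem

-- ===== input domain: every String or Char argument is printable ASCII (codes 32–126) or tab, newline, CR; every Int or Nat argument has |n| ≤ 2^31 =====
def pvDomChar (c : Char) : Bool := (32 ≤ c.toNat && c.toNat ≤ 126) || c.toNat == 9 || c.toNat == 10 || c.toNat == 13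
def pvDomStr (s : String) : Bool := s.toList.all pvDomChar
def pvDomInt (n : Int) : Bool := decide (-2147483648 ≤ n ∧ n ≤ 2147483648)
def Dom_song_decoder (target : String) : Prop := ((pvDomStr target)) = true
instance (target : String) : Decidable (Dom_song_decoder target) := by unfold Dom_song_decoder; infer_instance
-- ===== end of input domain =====

-- B replaces A's two stateful character-by-character passes by a tokenize-then-join
-- decomposition (split on ' ', drop empty tokens, join with ' '); objective: simpler.

-- ===== PORT A =====
def song_decoder (target : String) : String :=
  let no_wubs := PySem.Chars.replace target.toList "WUB".toList " ".toList
  let decoded := (PySem.List.enumerate no_wubs 0).foldl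
    (fun d p =>
      if p.2 ≠ ' ' then d ++ [p.2]
      else if 0 < p.1 ∧ p.2 = ' ' then
        (if PySem.List.pyGetD no_wubs (p.1 - 1) ' ' ≠ ' ' then d ++ [p.2] else d)
      else d) []
  let recoded := (PySem.List.enumerate decoded 0).foldl
    (fun r p => if p.1 = (decoded.length : Int) - 1 ∧ p.2 = ' ' then r else r ++ [p.2]) []
  String.ofList recoded

-- ===== PORT B =====
def song_decoder_alt (target : String) : String :=
  let no_wubs := PySem.Chars.replace target.toList "WUB".toList " ".toList
  String.ofList (PySem.Chars.join " ".toList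
    ((PySem.Chars.splitOn no_wubs " ".toList).filter (fun w => w ≠ [])))

-- ===== PRECONDITION & SPEC =====
def Spec_song_decoder (target : String) (out : String) : Prop := out = song_decoder_alt target
instance (target : String) (out : String) : Decidable (Spec_song_decoder target out) := by unfold Spec_song_decoder; infer_instance

-- ===== CLAIM (what is proved, stated in full; the proofs are below) =====
def Claim_equal_song_decoder : Prop := ∀ (target : String), Dom_song_decoder target → Spec_song_decoder target (song_decoder target)

-- ===== LEMMAS AND PROOFS =====

/-- `s.split(' ')` written as a structural recursion carrying the current piece. -/
def mySplit (pre : List Char) : List Char → List (List Char)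
  | [] => [pre]
  | c :: cs => if c = ' ' then pre :: mySplit [] cs else mySplit (pre ++ [c]) cs

/-- A's first loop as a one-pass recursion; the Bool is "previous char was a space (or start)". -/
def pass2 : Bool → List Char → List Char
  | _, [] => []
  | s, c :: cs => if c = ' ' then (if s then [] else [' ']) ++ pass2 true cs else c :: pass2 false cs

/-- The space-collapsed text as a function of the split pieces. -/
def G : Bool → List (List Char) → List Char
  | _, [] => []
  | s, p :: ps =>
    p ++ (match ps with
      | [] => []
      | _ :: _ => (if s ∧ p = [] then ([] : List Char) else [' ']) ++ G true ps)

/-- A's second loop: drop the final char iff it is a space. -/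
def trim (xs : List Char) : List Char :=
  if xs.getLast? = some ' ' then xs.dropLast else xs

theorem go_spec (fuel : Nat) : ∀ (l cur : List Char) (acc : List (List Char)), l.length ≤ fuel →
    PySem.Chars.splitOn.go [' '] fuel l cur acc = acc.reverse ++ mySplit cur.reverse l := by
  induction fuel with
  | zero =>
    intro l cur acc h
    have : l = [] := by cases l <;> simp_all
    subst this
    simp [PySem.Chars.splitOn.go, mySplit]
  | succ n ih =>
    intro l cur acc h
    cases l with
    | nil => simp [PySem.Chars.splitOn.go, mySplit]
    | cons c rest =>
      rw [PySem.Chars.splitOn.go]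
      by_cases hc : c = ' '
      · subst hc
        simp only [List.isPrefixOf, Bool.and_true, beq_self_eq_true, if_pos, List.length_cons] at *
        rw [ih _ _ _ (by simp; omega)]
        simp [mySplit]
      · have hp : [' '].isPrefixOf (c :: rest) = false := by
          simp [List.isPrefixOf, Ne.symm hc]
        rw [hp]
        simp only [Bool.false_eq_true, if_false]
        rw [ih _ _ _ (by simpa using Nat.le_of_succ_le_succ (by simpa using h))]
        simp [mySplit, hc]

theorem splitOn_eq (s : List Char) : PySem.Chars.splitOn s [' '] = mySplit [] s := by
  rw [PySem.Chars.splitOn, go_spec _ _ _ _ (by omega)]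
  simp

theorem mySplit_ne_nil (cs : List Char) : ∀ (pre : List Char), mySplit pre cs ≠ [] := by
  induction cs with
  | nil => intro pre; simp [mySplit]
  | cons c cs ih => intro pre; by_cases hc : c = ' ' <;> simp [mySplit, hc, ih]

theorem mySplit_shift (cs : List Char) : ∀ (pre : List Char),
    mySplit pre cs = (pre ++ (mySplit [] cs).headI) :: (mySplit [] cs).tail := by
  induction cs with
  | nil => intro pre; simp [mySplit]
  | cons c cs ih =>
    intro pre
    by_cases hc : c = ' '
    · simp [mySplit, hc]
    · simp only [mySplit, if_neg hc]
      rw [ih (pre ++ [c])]; simp only [List.nil_append]; rw [ih [c]]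
      simp

theorem mySplit_no_space (cs : List Char) : ∀ (pre : List Char), (' ' ∉ pre) →
    ∀ p ∈ mySplit pre cs, ' ' ∉ p := by
  induction cs with
  | nil => intro pre h p hp; simp [mySplit] at hp; simpa [hp] using h
  | cons c cs ih =>
    intro pre h p hp
    by_cases hc : c = ' '
    · simp [mySplit, hc] at hp
      rcases hp with hp | hp
      · simpa [hp] using h
      · exact ih [] (by simp) p hp
    · simp only [mySplit, if_neg hc] at hp
      exact ih (pre ++ [c]) (by simp [h, Ne.symm hc]) p hp

theorem pass2_eq_G (cs : List Char) : ∀ (s : Bool), pass2 s cs = G s (mySplit [] cs) := by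
  induction cs with
  | nil => intro s; simp [pass2, mySplit, G]
  | cons c cs ih =>
    intro s
    by_cases hc : c = ' '
    · have hne := mySplit_ne_nil cs []
      simp only [pass2, if_pos hc, mySplit, hc, if_pos rfl]
      cases hms : mySplit [] cs with
      | nil => exact absurd hms hne
      | cons q qs =>
        rw [ih true, hms]
        cases s <;> simp [G]
    · simp only [pass2, if_neg hc, mySplit, if_neg hc, List.nil_append]
      rw [mySplit_shift cs [c], ih false]
      have hne := mySplit_ne_nil cs []
      cases hms : mySplit [] cs with
      | nil => exact absurd hms hne
      | cons q qs =>
        simp only [hms, List.headI, List.tail]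
        cases qs with
        | nil => simp [G]
        | cons r rs => simp [G]

theorem G_all_empty (ps : List (List Char)) (h : ∀ p ∈ ps, p = []) : G true ps = [] := by
  induction ps with
  | nil => simp [G]
  | cons p ps ih =>
    have hp : p = [] := h p (by simp)
    cases ps with
    | nil => simp [G, hp]
    | cons q qs =>
      have hq := ih (fun r hr => h r (by simp [hr]))
      have : G true ([] :: q :: qs) = G true (q :: qs) := by simp [G]
      rw [hp, this, hq]

theorem G_ne_nil (ps : List (List Char)) (h : ps.filter (fun w => w ≠ []) ≠ []) :
    G true ps ≠ [] := by
  induction ps with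
  | nil => simp at h
  | cons p ps ih =>
    by_cases hp : p = []
    · have h' : ps.filter (fun w => w ≠ []) ≠ [] := by simpa [hp] using h
      cases ps with
      | nil => simp at h'
      | cons q qs =>
        simpa [G, hp] using ih h'
    · cases ps with
      | nil => simpa [G] using hp
      | cons q qs => simp [G, hp]

theorem trim_append (x y : List Char) (h : y ≠ []) : trim (x ++ y) = x ++ trim y := by
  unfold trim
  rw [List.getLast?_append_of_ne_nil x h, List.dropLast_append_of_ne_nil h]
  split_ifs <;> rfl

theorem trim_no_space (p : List Char) (h : ' ' ∉ p) : trim p = p := by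
  unfold trim
  split_ifs with hl
  · exact absurd (List.mem_of_getLast? hl) h
  · rfl

theorem trim_cons (c : Char) (cs : List Char) (h : cs ≠ []) : trim (c :: cs) = c :: trim cs := by
  simpa using trim_append [c] cs h

theorem trim_G (ps : List (List Char)) (h : ∀ p ∈ ps, ' ' ∉ p) :
    trim (G true ps) = PySem.Chars.join [' '] (ps.filter (fun w => w ≠ [])) := by
  induction ps with
  | nil => simp [G, trim, PySem.Chars.join_nil]
  | cons p ps ih =>
    by_cases hp : p = []
    · cases ps with
      | nil => simp [G, hp, trim, PySem.Chars.join_nil]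
      | cons q qs =>
        have : G true (p :: q :: qs) = G true (q :: qs) := by simp [G, hp]
        rw [this, ih (fun r hr => h r (by simp [hr]))]
        simp [hp]
    · have hfp : (p :: ps).filter (fun w => w ≠ []) = p :: ps.filter (fun w => w ≠ []) := by
        simp [hp]
      rw [hfp]
      cases ps with
      | nil =>
        simp only [G, List.filter_nil, PySem.Chars.join_singleton]
        exact (by simpa using trim_no_space p (h p (by simp)))
      | cons q qs =>
        have hG : G true (p :: q :: qs) = p ++ [' '] ++ G true (q :: qs) := by
          simp [G, hp]
        rw [hG]
        by_cases hf : (q :: qs).filter (fun w => w ≠ []) = []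
        · have hGe : G true (q :: qs) = [] := by
            apply G_all_empty
            intro r hr
            by_contra hre
            have : r ∈ (q :: qs).filter (fun w => w ≠ []) := by
              simp [List.mem_filter, hr, hre]
            rw [hf] at this
            simp at this
          rw [hGe, hf, PySem.Chars.join_singleton]
          have : trim (p ++ [' '] ++ []) = p := by
            rw [List.append_nil, trim_append p [' '] (by simp)]
            simp [trim]
          simpa using this
        · cases hfq : (q :: qs).filter (fun w => w ≠ []) with
          | nil => exact absurd hfq hf
          | cons r rs =>
            rw [List.append_assoc, trim_append p ([' '] ++ G true (q :: qs)) (by simp),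
              show ([' '] ++ G true (q :: qs)) = ' ' :: G true (q :: qs) from rfl,
              trim_cons _ _ (G_ne_nil _ hf),
              ih (fun r hr => h r (by simp [hr])), hfq, PySem.Chars.join_cons_cons]
            simp

theorem pyGetD_last (front xs : List Char) (h : front ≠ []) :
    PySem.List.pyGetD (front ++ xs) ((front.length : Int) - 1) ' ' = front.getLastD ' ' := by
  have h1 : 1 ≤ front.length := by
    cases front with
    | nil => exact absurd rfl h
    | cons a l => simp
  have hc : ((front.length : Int) - 1) = ((front.length - 1 : Nat) : Int) := by omega
  rw [hc, PySem.List.pyGetD_natCast]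
  rw [List.getD_eq_getElem?_getD, List.getElem?_append_left (by omega)]
  rw [List.getLastD_eq_getLast?, List.getLast?_eq_getElem?]

def stepA (L : List Char) (d : List Char) (p : Int × Char) : List Char :=
  if p.2 ≠ ' ' then d ++ [p.2]
  else if 0 < p.1 ∧ p.2 = ' ' then
    (if PySem.List.pyGetD L (p.1 - 1) ' ' ≠ ' ' then d ++ [p.2] else d)
  else d

def stepB (n : Int) (r : List Char) (p : Int × Char) : List Char :=
  if p.1 = n - 1 ∧ p.2 = ' ' then r else r ++ [p.2]

theorem loop1 (L : List Char) : ∀ (xs front acc : List Char), L = front ++ xs →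
    (PySem.List.enumerate xs (front.length : Int)).foldl (stepA L) acc
      = acc ++ pass2 (front.getLastD ' ' == ' ') xs := by
  intro xs
  induction xs with
  | nil => intro front acc hL; simp [PySem.List.enumerate, pass2]
  | cons c cs ih =>
    intro front acc hL
    rw [PySem.List.enumerate_cons, List.foldl_cons]
    have hlen : ((front.length : Int) + 1) = (((front.length + 1 : Nat)) : Int) := by push_cast; ring
    by_cases hc : c = ' '
    · subst hc
      by_cases hf : front = []
      · subst hf
        have hstep : stepA L acc ((([] : List Char).length : Int), ' ') = acc := by
          simp [stepA]
        rw [hstep, hlen]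
        have := ih [' '] acc (by simpa using hL)
        simp only [List.length_cons, List.length_nil, List.getLastD] at this ⊢
        rw [this]
        simp [pass2]
      · have hpos : (0 : Int) < (front.length : Int) := by
          have := List.length_pos_of_ne_nil hf
          omega
        have hget : PySem.List.pyGetD L ((front.length : Int) - 1) ' ' = front.getLastD ' ' := by
          rw [hL]; exact pyGetD_last front (' ' :: cs) hf
        have hstep : stepA L acc (((front.length : Int)), ' ') =
            acc ++ (if front.getLastD ' ' = ' ' then [] else [' ']) := by
          simp only [stepA, ne_eq, not_true_eq_false, if_false, hpos, and_true, if_pos, hget]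
          split_ifs with h1 h2 <;> simp_all
        rw [hstep, hlen]
        have := ih (front ++ [' ']) (acc ++ (if front.getLastD ' ' = ' ' then [] else [' ']))
          (by simpa using hL)
        simp only [List.length_append, List.length_cons, List.length_nil] at this ⊢
        rw [this]
        have hgl : (front ++ [' ']).getLastD ' ' = ' ' := by simp
        rw [hgl]
        by_cases hsp : front.getLastD ' ' = ' ' <;> simp [pass2, hsp]
    · have hstep : stepA L acc (((front.length : Int)), c) = acc ++ [c] := by
        simp [stepA, hc]
      rw [hstep, hlen]
      have := ih (front ++ [c]) (acc ++ [c]) (by simpa using hL)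
      simp only [List.length_append, List.length_cons, List.length_nil] at this ⊢
      rw [this]
      have hgl : (front ++ [c]).getLastD ' ' = c := by simp
      rw [hgl]
      simp [pass2, hc, Bool.beq_eq_decide_eq]

theorem loop2 (n : Nat) : ∀ (xs : List Char) (k : Nat) (acc : List Char), k + xs.length = n →
    (PySem.List.enumerate xs (k : Int)).foldl (stepB (n : Int)) acc
    = acc ++ trim xs := by
  intro xs
  induction xs with
  | nil => intro k acc h; simp [PySem.List.enumerate, trim]
  | cons c cs ih =>
    intro k acc h
    rw [PySem.List.enumerate_cons, List.foldl_cons]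
    cases cs with
    | nil =>
      have hk : (k : Int) = (n : Int) - 1 := by simp at h; omega
      rw [PySem.List.enumerate_nil, List.foldl_nil]
      by_cases hc : c = ' '
      · rw [show stepB (n : Int) acc ((k : Int), c) = acc from by simp [stepB, hk, hc]]
        simp [trim, hc]
      · rw [show stepB (n : Int) acc ((k : Int), c) = acc ++ [c] from by simp [stepB, hc]]
        simp [trim, hc]
    | cons d ds =>
      have hk : ¬ ((k : Int) = (n : Int) - 1) := by simp at h; omega
      rw [show stepB (n : Int) acc ((k : Int), c) = acc ++ [c] from by simp [stepB, hk]]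
      have := ih (k + 1) (acc ++ [c]) (by simp at h ⊢; omega)
      rw [show ((k : Int) + 1) = ((k + 1 : Nat) : Int) by push_cast; ring, this]
      rw [trim_cons c (d :: ds) (by simp)]
      simp

theorem main_lists (cs : List Char) :
    trim (pass2 true cs)
      = PySem.Chars.join [' '] ((PySem.Chars.splitOn cs [' ']).filter (fun w => w ≠ [])) := by
  rw [splitOn_eq, pass2_eq_G, trim_G]
  exact mySplit_no_space cs [] (by simp)

theorem ports_eq (nw : List Char) :
    String.ofList ((PySem.List.enumerate ((PySem.List.enumerate nw 0).foldl (stepA nw) []) 0).foldl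
      (stepB (((PySem.List.enumerate nw 0).foldl (stepA nw) []).length : Int)) [])
    = String.ofList (PySem.Chars.join [' '] ((PySem.Chars.splitOn nw [' ']).filter (fun w => w ≠ []))) := by
  have h1 : (PySem.List.enumerate nw 0).foldl (stepA nw) [] = pass2 true nw := by
    simpa using loop1 nw nw [] [] rfl
  rw [h1]
  have h2 := loop2 (pass2 true nw).length (pass2 true nw) 0 [] (by simp)
  norm_num at h2
  rw [h2, main_lists]

-- ===== VERDICT (by name: the statement is the Claim_ definition above) =====
theorem song_decoder_spec : Claim_equal_song_decoder := by
  intro target _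
  unfold Spec_song_decoder
  exact ports_eq (PySem.Chars.replace target.toList "WUB".toList " ".toList)
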